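-- pv_equiv track=rewrite | github.com/costeamarius/codecortex | codecortex/feature_graph.py | _related_features
-- ===== SOURCE A (Python) =====
-- def _related_features(existing_features, selected_files, current_name):
--     related = []
--     file_set = set(selected_files)
--     for feature in existing_features:
--         name = feature.get("name")
--         if name == current_name:
--             continue
--         existing_files = set(feature.get("files", []))
--         if file_set & existing_files:
--             related.append(name)
--     return sorted(related)
-- ===== SOURCE B (Python) =====
-- def _related_features(existing_features, selected_files, current_name):
--     index = {}
--     for i, feature in enumerate(existing_features):
--         for f in feature.get("files", []):
--             index.setdefault(f, []).append(i)
--     matched = set()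
--     for f in selected_files:
--         matched.update(index.get(f, []))
--     names = [existing_features[i].get("name") for i in sorted(matched)
--              if existing_features[i].get("name") != current_name]
--     return sorted(names)
-- ===== Notes on version B (the rewrite author's own statement) =====
-- stated objective: alternative
-- what changed: B builds an inverted index mapping each file element to the list of feature indices containing it in one pass, then looks up only the selected files and collects the matched indices in a set, instead of A's per-feature set-intersection against the selected-file set.
-- outside the precondition, e.g. on _related_features([{'files': 'a'}], ['a'], 'x'): A returns [None], B returns [None]
import Mathlib
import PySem

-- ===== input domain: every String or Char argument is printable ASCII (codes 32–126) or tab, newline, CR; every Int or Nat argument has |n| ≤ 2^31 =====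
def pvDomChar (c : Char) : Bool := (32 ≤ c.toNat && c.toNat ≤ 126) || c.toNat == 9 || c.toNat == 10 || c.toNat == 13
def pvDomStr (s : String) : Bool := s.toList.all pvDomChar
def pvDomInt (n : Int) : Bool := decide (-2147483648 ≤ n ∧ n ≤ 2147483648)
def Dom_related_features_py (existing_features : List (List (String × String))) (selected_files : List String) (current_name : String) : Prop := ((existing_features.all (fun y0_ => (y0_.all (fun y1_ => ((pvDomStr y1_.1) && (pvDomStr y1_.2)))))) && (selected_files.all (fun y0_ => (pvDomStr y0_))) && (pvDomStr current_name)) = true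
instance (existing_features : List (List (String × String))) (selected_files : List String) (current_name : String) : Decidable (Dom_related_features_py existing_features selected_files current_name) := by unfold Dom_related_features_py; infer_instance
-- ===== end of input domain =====

-- B replaces A's per-feature set-intersection scan with an inverted file→feature-index map
-- built in one pass, then looks up only the selected files (objective: alternative decomposition).
-- Features are dicts str→str, so feature.get("files", []) iterates the CHARACTERS of the files
-- string; both programs treat them as one-character file names.

-- ===== PORT A =====
-- set(feature.get("files", [])): the value is a string, so its elements are its one-char strings
def pvCharStrs (feature : List (String × String)) : List String :=
  ((PySem.Dict.get? (PySem.Dict.mk feature) "files").getD "").toList.map (fun c => String.ofList [c])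

def related_features_py (existing_features : List (List (String × String))) (selected_files : List String) (current_name : String) : List String :=
  let file_set : PySem.Set String := PySem.Set.ofList selected_files
  let related : List String := existing_features.foldl (fun related feature =>
    let name := PySem.Dict.get? (PySem.Dict.mk feature) "name"
    if name == some current_name then related
    else
      let existing_files : PySem.Set String := PySem.Set.ofList (pvCharStrs feature)
      if PySem.Set.inter file_set existing_files ≠ [] then
        -- A appends `name`; under Pre_ every appended name is present, so .getD "" is exact
        related ++ [name.getD ""]
      else related) []
  PySem.List.sorted related (fun x => x) false

-- ===== PORT B =====
def pvBuildIndex (existing_features : List (List (String × String))) : PySem.Dict String (List Int) :=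
  (PySem.List.enumerate existing_features).foldl (fun d p =>
    (pvCharStrs p.2).foldl (fun d f =>
      PySem.Dict.insert d f ((PySem.Dict.getD d f []) ++ [p.1])) d) PySem.Dict.empty

def related_features_py_alt (existing_features : List (List (String × String))) (selected_files : List String) (current_name : String) : List String :=
  let index := pvBuildIndex existing_features
  let matched : PySem.Set Int := selected_files.foldl
    (fun m f => PySem.Set.update m (PySem.Dict.getD index f [])) PySem.Set.empty
  let names : List String := (PySem.List.sorted matched (fun x => x) false).filterMap (fun i =>
    -- existing_features[i]: i is an index stored by the build pass, always in range
    let name := PySem.Dict.get? (PySem.Dict.mk (PySem.List.pyGetD existing_features i [])) "name"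
    if name != some current_name then some (name.getD "") else none)
  PySem.List.sorted names (fun x => x) false

-- ===== PRECONDITION & SPEC =====
-- Pre_ excludes inputs where a feature without a "name" key shares a file with the selection:
-- there A puts None (not a str) into the result, or raises TypeError sorting several Nones.
def Pre_related_features_py (existing_features : List (List (String × String))) (selected_files : List String) (current_name : String) : Prop :=
  ∀ feature ∈ existing_features,
    (PySem.Dict.get? (PySem.Dict.mk feature) "name").isSome = true ∨ ∀ f ∈ selected_files, f ∉ pvCharStrs feature
instance (existing_features : List (List (String × String))) (selected_files : List String) (current_name : String) : Decidable (Pre_related_features_py existing_features selected_files current_name) := by unfold Pre_related_features_py; infer_instance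

def pvWitness_related_features_py : (List (List (String × String))) × List String × String :=
  ([[("name", "feat1"), ("files", "ab")], [("name", "me"), ("files", "a")]], ["a", "zz"], "me")

def Spec_related_features_py (existing_features : List (List (String × String))) (selected_files : List String) (current_name : String) (out : List String) : Prop := out = related_features_py_alt existing_features selected_files current_name
instance (existing_features : List (List (String × String))) (selected_files : List String) (current_name : String) (out : List String) : Decidable (Spec_related_features_py existing_features selected_files current_name out) := by unfold Spec_related_features_py; infer_instance

-- ===== CLAIM (what is proved, stated in full; the proofs are below) =====
def Claim_equal_related_features_py : Prop := ∀ (existing_features : List (List (String × String))) (selected_files : List String) (current_name : String), Dom_related_features_py existing_features selected_files current_name → Pre_related_features_py existing_features selected_files current_name → Spec_related_features_py existing_features selected_files current_name (related_features_py existing_features selected_files current_name)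

-- ===== LEMMAS AND PROOFS =====

-- the per-feature contribution of A's loop body
def pvG (selected_files : List String) (current_name : String) (feature : List (String × String)) : Option String :=
  if (PySem.Dict.get? (PySem.Dict.mk feature) "name") == some current_name then none
  else if PySem.Set.inter (PySem.Set.ofList selected_files) (PySem.Set.ofList (pvCharStrs feature)) ≠ [] then
    some ((PySem.Dict.get? (PySem.Dict.mk feature) "name").getD "")
  else none

-- the strictly increasing list of indices of matching features
def pvM (ef : List (List (String × String))) (sf : List String) : List Int :=
  ((PySem.List.enumerate ef).filter (fun p => sf.any (fun f => (pvCharStrs p.2).contains f))).map (·.1)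

theorem pv_inter_ne_nil (s t : List String) :
    PySem.Set.inter (PySem.Set.ofList s) (PySem.Set.ofList t) ≠ [] ↔ ∃ f ∈ s, f ∈ t := by
  rw [Ne, List.eq_nil_iff_forall_not_mem]
  push_neg
  simp [PySem.Set.mem_inter, PySem.Set.mem_ofList]

theorem pv_inner_mem (cs : List String) (i : Int) (d : PySem.Dict String (List Int)) (f : String) (x : Int) :
    x ∈ (cs.foldl (fun d c => PySem.Dict.insert d c ((PySem.Dict.getD d c []) ++ [i])) d).getD f [] ↔
      x ∈ d.getD f [] ∨ (x = i ∧ f ∈ cs) := by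
  induction cs generalizing d with
  | nil => simp
  | cons c cs ih =>
    simp only [List.foldl_cons, ih, PySem.Dict.getD_insert, List.mem_cons]
    by_cases hfc : f = c <;> simp [hfc] <;> tauto

theorem pv_index_mem (l : List (Int × List (String × String))) (d : PySem.Dict String (List Int)) (f : String) (x : Int) :
    x ∈ (l.foldl (fun d p =>
      (pvCharStrs p.2).foldl (fun d c => PySem.Dict.insert d c ((PySem.Dict.getD d c []) ++ [p.1])) d) d).getD f [] ↔
      x ∈ d.getD f [] ∨ ∃ p ∈ l, x = p.1 ∧ f ∈ pvCharStrs p.2 := by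
  induction l generalizing d with
  | nil => simp
  | cons q l ih =>
    simp only [List.foldl_cons, ih, pv_inner_mem, List.mem_cons]
    constructor
    · rintro (((h|⟨h1,h2⟩)|h)) 
      · exact Or.inl h
      · exact Or.inr ⟨q, Or.inl rfl, h1, h2⟩
      · obtain ⟨p, hp, h⟩ := h; exact Or.inr ⟨p, Or.inr hp, h⟩
    · rintro (h|⟨p, (rfl|hp), h⟩)
      · exact Or.inl (Or.inl h)
      · exact Or.inl (Or.inr h)
      · exact Or.inr ⟨p, hp, h⟩

theorem pv_matched_mem (index : PySem.Dict String (List Int)) (sf : List String) (s : PySem.Set Int) (x : Int) :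
    x ∈ sf.foldl (fun m f => PySem.Set.update m (PySem.Dict.getD index f [])) s ↔
      x ∈ s ∨ ∃ f ∈ sf, x ∈ PySem.Dict.getD index f [] := by
  induction sf generalizing s with
  | nil => simp
  | cons f sf ih =>
    simp only [List.foldl_cons, ih, PySem.Set.mem_update, List.mem_cons]
    constructor
    · rintro ((h|h)|⟨g,hg,h⟩)
      · exact Or.inl h
      · exact Or.inr ⟨f, Or.inl rfl, h⟩
      · exact Or.inr ⟨g, Or.inr hg, h⟩
    · rintro (h|⟨g,(rfl|hg),h⟩)
      · exact Or.inl (Or.inl h)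
      · exact Or.inl (Or.inr h)
      · exact Or.inr ⟨g, hg, h⟩

theorem pv_matched_nodup (index : PySem.Dict String (List Int)) (sf : List String) (s : PySem.Set Int) (hs : s.Nodup) :
    (sf.foldl (fun m f => PySem.Set.update m (PySem.Dict.getD index f [])) s).Nodup := by
  induction sf generalizing s with
  | nil => exact hs
  | cons f sf ih => exact ih _ (PySem.Set.nodup_update _ _ hs)

theorem pv_mem_M (ef : List (List (String × String))) (sf : List String) (x : Int) :
    x ∈ pvM ef sf ↔ ∃ p ∈ PySem.List.enumerate ef 0, x = p.1 ∧ ∃ f ∈ sf, f ∈ pvCharStrs p.2 := by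
  simp only [pvM, List.mem_map, List.mem_filter, List.any_eq_true, List.contains_iff_mem]
  constructor
  · rintro ⟨p, ⟨hp, f, hf, hc⟩, rfl⟩
    exact ⟨p, hp, rfl, f, hf, hc⟩
  · rintro ⟨p, hp, rfl, f, hf, hc⟩
    exact ⟨p, ⟨hp, f, hf, hc⟩, rfl⟩

theorem pvM_pairwise (ef : List (List (String × String))) (sf : List String) :
    (pvM ef sf).Pairwise (· < ·) := by
  unfold pvM
  refine List.Pairwise.map _ (fun a b h => h) ?_
  exact List.Pairwise.filter _ (PySem.List.pairwise_lt_enumerate ef 0)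

theorem pv_sorted_matched (ef : List (List (String × String))) (sf : List String) :
    PySem.List.sorted (sf.foldl (fun m f => PySem.Set.update m (PySem.Dict.getD (pvBuildIndex ef) f [])) PySem.Set.empty) (fun x => x) false
      = pvM ef sf := by
  apply PySem.List.sorted_eq_of_perm_of_pairwise_lt _ _ _ ?_ (pvM_pairwise ef sf)
  rw [List.perm_ext_iff_of_nodup ((pvM_pairwise ef sf).imp ne_of_lt)
    (pv_matched_nodup _ _ PySem.Set.empty List.nodup_nil)]
  intro x
  rw [pv_mem_M, pv_matched_mem]
  unfold pvBuildIndex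
  simp only [pv_index_mem, PySem.Dict.getD_empty, List.not_mem_nil, false_or]
  tauto

theorem pvA_loop (ef : List (List (String × String))) (sf : List String) (cn : String) (acc : List String) :
    ef.foldl (fun related feature =>
      if (PySem.Dict.get? (PySem.Dict.mk feature) "name") == some cn then related
      else
        if PySem.Set.inter (PySem.Set.ofList sf) (PySem.Set.ofList (pvCharStrs feature)) ≠ [] then
          related ++ [(PySem.Dict.get? (PySem.Dict.mk feature) "name").getD ""]
        else related) acc = acc ++ ef.filterMap (pvG sf cn) := by
  induction ef generalizing acc with
  | nil => simp
  | cons feat ef ih =>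
    simp only [List.foldl_cons, List.filterMap_cons, ih, pvG]
    split_ifs with h1 h2
    · simp
    · simp
    · simp

theorem pv_filterMap_filter {α β : Type} (P : α → Bool) (F : α → Option β) (l : List α) :
    (l.filter P).filterMap F = l.filterMap (fun x => if P x then F x else none) := by
  induction l with
  | nil => rfl
  | cons x l ih =>
    by_cases h : P x <;> simp [List.filter_cons, List.filterMap_cons, h, ih]

theorem pv_names_eq (ef : List (List (String × String))) (sf : List String) (cn : String) :
    (pvM ef sf).filterMap (fun i =>
      if (PySem.Dict.get? (PySem.Dict.mk (PySem.List.pyGetD ef i [])) "name") != some cn then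
        some ((PySem.Dict.get? (PySem.Dict.mk (PySem.List.pyGetD ef i [])) "name").getD "")
      else none) = ef.filterMap (pvG sf cn) := by
  unfold pvM
  rw [List.filterMap_map]
  rw [List.filterMap_congr (g := fun p =>
      if (PySem.Dict.get? (PySem.Dict.mk (p.2 : List (String × String))) "name") != some cn then
        some ((PySem.Dict.get? (PySem.Dict.mk p.2) "name").getD "")
      else none) ?_]
  · rw [pv_filterMap_filter]
    conv_rhs => rw [← PySem.List.map_snd_enumerate ef 0]
    rw [List.filterMap_map]
    apply List.filterMap_congr
    intro p hp
    simp only [Function.comp]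
    by_cases hm : sf.any (fun f => (pvCharStrs p.2).contains f)
    · simp only [hm, if_true]
      unfold pvG
      have hint : PySem.Set.inter (PySem.Set.ofList sf) (PySem.Set.ofList (pvCharStrs p.2)) ≠ [] := by
        rw [pv_inter_ne_nil]
        simpa [List.any_eq_true, List.contains_iff_mem] using hm
      by_cases hn : (PySem.Dict.get? (PySem.Dict.mk p.2) "name") == some cn
      · simp [hn, bne]
      · simp [hn, bne, hint]
    · simp only [hm, Bool.false_eq_true, if_false]
      unfold pvG
      have hint : ¬ PySem.Set.inter (PySem.Set.ofList sf) (PySem.Set.ofList (pvCharStrs p.2)) ≠ [] := by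
        rw [pv_inter_ne_nil]
        simpa [List.any_eq_true, List.contains_iff_mem] using hm
      by_cases hn : (PySem.Dict.get? (PySem.Dict.mk p.2) "name") == some cn
      · simp [hn]
      · simp [hn, hint]
  · intro p hp
    have hp' : p ∈ PySem.List.enumerate ef 0 := (List.mem_filter.mp hp).1
    rw [PySem.List.mem_enumerate_iff] at hp'
    obtain ⟨k, hk, rfl⟩ := hp'
    simp only [Function.comp, zero_add, PySem.List.pyGetD_natCast, List.getD_eq_getElem?_getD,
      List.getElem?_eq_getElem hk, Option.getD_some]

theorem pv_main (ef : List (List (String × String))) (sf : List String) (cn : String) :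
    related_features_py ef sf cn = related_features_py_alt ef sf cn := by
  unfold related_features_py related_features_py_alt
  simp only []
  rw [pvA_loop, pv_sorted_matched, pv_names_eq]
  simp

-- ===== VERDICT (by name: the statement is the Claim_ definition above) =====
theorem related_features_py_spec : Claim_equal_related_features_py := by
  intro ef sf cn _ _
  unfold Spec_related_features_py
  exact pv_main ef sf cn
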